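-- pv_equiv track=rewrite | github.com/Jaswanth-Kumar-2007/Python-Works | Tiny Functions/a2equalb3.py | answer
-- ===== SOURCE A (Python) =====
-- def answer(n):
--     res = []
--     for a in range(n):
--         for b in range(n):
--             if a**2 == b**3:
--                 s = [a,b]
--                 res.append(s)
--     return res,len(res)
-- ===== SOURCE B (Python) =====
-- def answer(n):
--     # a**2 == b**3 with 0 <= a,b < n  iff  a = t**3, b = t**2 for some t >= 0:
--     # enumerate t directly instead of scanning all (a, b) pairs.
--     res = []
--     t = 0
--     while t ** 3 < n and t ** 2 < n:
--         res.append([t ** 3, t ** 2])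
--         t += 1
--     return res, len(res)
-- ===== Notes on version B (the rewrite author's own statement) =====
-- stated objective: faster
-- what changed: Replaces the O(n^2) double scan over all pairs (a,b) by direct enumeration of the sixth-power parametrization a=t^3, b=t^2 while both are below n.
import Mathlib
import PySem

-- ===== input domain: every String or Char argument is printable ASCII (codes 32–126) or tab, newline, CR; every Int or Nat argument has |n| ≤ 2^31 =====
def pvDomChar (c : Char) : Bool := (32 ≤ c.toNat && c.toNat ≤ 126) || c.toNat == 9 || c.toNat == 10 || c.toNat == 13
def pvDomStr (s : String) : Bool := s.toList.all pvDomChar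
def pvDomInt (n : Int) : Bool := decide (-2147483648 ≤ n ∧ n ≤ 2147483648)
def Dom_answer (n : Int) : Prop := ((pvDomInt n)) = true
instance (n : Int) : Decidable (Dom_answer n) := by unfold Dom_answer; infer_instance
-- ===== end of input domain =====

-- B replaces A's double scan over all pairs (a,b) by direct enumeration of the solutions a = t^3, b = t^2.

-- ===== PORT A =====
def answer (n : Int) : List (List Int) × Int :=
  let res := (PySem.List.pyRange 0 n 1).foldl (fun res a =>
      (PySem.List.pyRange 0 n 1).foldl (fun res b =>
        if a ^ 2 = b ^ 3 then res ++ [[a, b]] else res) res) []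
  (res, (res.length : Int))

-- ===== PORT B =====
-- the while loop of Source B; the counter t starts at 0 and only increments, so it is carried as a Nat
def altLoop (n : Int) (t : Nat) : List (List Int) :=
  if (t : Int) ^ 3 < n ∧ (t : Int) ^ 2 < n then
    [(t : Int) ^ 3, (t : Int) ^ 2] :: altLoop n (t + 1)
  else []
termination_by (n - t).toNat
decreasing_by
  rename_i h
  have ht : (t : Int) ≤ (t : Int) ^ 3 := by
    have := Nat.le_self_pow (n := 3) (by norm_num) t
    exact_mod_cast this
  omega

def answer_alt (n : Int) : List (List Int) × Int :=
  let res := altLoop n 0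
  (res, (res.length : Int))

-- ===== PRECONDITION & SPEC =====
def Spec_answer (n : Int) (out : List (List Int) × Int) : Prop := out = answer_alt n
instance (n : Int) (out : List (List Int) × Int) : Decidable (Spec_answer n out) := by unfold Spec_answer; infer_instance

-- ===== CLAIM (what is proved, stated in full; the proofs are below) =====
def Claim_equal_answer : Prop := ∀ (n : Int), Dom_answer n → Spec_answer n (answer n)

-- ===== LEMMAS AND PROOFS =====

-- elementary number theory: a² = b³ (in ℕ) exactly for a = t³, b = t²
theorem sq_eq_cube_iff (a b : ℕ) : a ^ 2 = b ^ 3 ↔ ∃ t, a = t ^ 3 ∧ b = t ^ 2 := by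
  constructor
  · intro h
    rcases Nat.eq_zero_or_pos b with hb | hb
    · subst hb
      refine ⟨0, ?_, by norm_num⟩
      have : a ^ 2 = 0 := by simpa using h
      simpa using pow_eq_zero_iff (n := 2) (by norm_num) |>.mp this
    · have hdvd : b ∣ a := by
        have h2 : b ^ 2 ∣ a ^ 2 := ⟨b, by rw [h]; ring⟩
        exact (Nat.pow_dvd_pow_iff (by norm_num)).mp h2
      obtain ⟨t, rfl⟩ := hdvd
      have hbt : t ^ 2 = b := by
        have h' : b ^ 2 * t ^ 2 = b ^ 2 * b := by
          have : (b * t) ^ 2 = b ^ 3 := h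
          nlinarith [this]
        exact Nat.eq_of_mul_eq_mul_left (by positivity) h'
      exact ⟨t, by rw [← hbt]; ring, hbt.symm⟩
  · rintro ⟨t, rfl, rfl⟩; ring

theorem flatMap_eq_nil_of {α β : Type} (l : List α) (g : α → List β)
    (h : ∀ a ∈ l, g a = []) : l.flatMap g = [] := by
  simp only [List.flatMap_eq_nil_iff]; exact h

-- a flatMap whose function vanishes except at one element of a Nodup list
theorem flatMap_eq_of_unique {α β : Type} (l : List α) (g : α → List β) (b₀ : α)
    (hnd : l.Nodup) (hmem : b₀ ∈ l) (hz : ∀ a ∈ l, a ≠ b₀ → g a = []) :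
    l.flatMap g = g b₀ := by
  induction l with
  | nil => cases hmem
  | cons x xs ih =>
    rcases List.nodup_cons.mp hnd with ⟨hx, hnd'⟩
    by_cases hxb : x = b₀
    · subst hxb
      have hnil : xs.flatMap g = [] :=
        flatMap_eq_nil_of xs g (fun a ha => hz a (List.mem_cons_of_mem _ ha)
          (fun hh => hx (hh ▸ ha)))
      simp [List.flatMap_cons, hnil]
    · have hmem' : b₀ ∈ xs := by
        cases hmem with
        | head => exact absurd rfl hxb
        | tail _ h => exact h
      have := ih hnd' hmem' (fun a ha => hz a (List.mem_cons_of_mem _ ha))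
      simp [List.flatMap_cons, hz x List.mem_cons_self hxb, this]

-- (filter then map) as a flatMap, to put A's inner loop in flatMap form
theorem filter_map_eq_flatMap {α β : Type} (l : List α) (p : α → Bool) (f : α → β) :
    (l.filter p).map f = l.flatMap (fun b => if p b then [f b] else []) := by
  induction l with
  | nil => rfl
  | cons x xs ih =>
    by_cases hx : p x <;> simp [List.flatMap_cons, hx, ih]

-- the Int version of the characterization, for nonnegative a b
theorem sq_eq_cube_iff_int (a b : ℤ) (ha : 0 ≤ a) (hb : 0 ≤ b) :
    a ^ 2 = b ^ 3 ↔ ∃ t : ℕ, a = (t : ℤ) ^ 3 ∧ b = (t : ℤ) ^ 2 := by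
  constructor
  · intro h
    have hnat : a.toNat ^ 2 = b.toNat ^ 3 := by
      have : ((a.toNat : ℤ)) ^ 2 = ((b.toNat : ℤ)) ^ 3 := by
        rw [Int.toNat_of_nonneg ha, Int.toNat_of_nonneg hb]; exact h
      exact_mod_cast this
    obtain ⟨t, h1, h2⟩ := (sq_eq_cube_iff _ _).mp hnat
    refine ⟨t, ?_, ?_⟩
    · have := congrArg (fun x : ℕ => (x : ℤ)) h1
      simpa [Int.toNat_of_nonneg ha] using this
    · have := congrArg (fun x : ℕ => (x : ℤ)) h2
      simpa [Int.toNat_of_nonneg hb] using this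
  · rintro ⟨t, rfl, rfl⟩; ring

-- cube is injective on nonnegative integers
theorem cube_inj_nonneg (b c : ℤ) (hb : 0 ≤ b) (hc : 0 ≤ c) (h : b ^ 3 = c ^ 3) : b = c := by
  rcases lt_trichotomy b c with h1 | h1 | h1
  · exfalso; have : b ^ 3 < c ^ 3 := by gcongr
    omega
  · exact h1
  · exfalso; have : c ^ 3 < b ^ 3 := by gcongr
    omega

-- A's inner loop (in flatMap form) over the full b-range, as a function of a
def innerA (n a : Int) : List (List Int) :=
  (PySem.List.pyRange 0 n 1).flatMap (fun b => if a ^ 2 = b ^ 3 then [[a, b]] else [])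

-- t² < n whenever t³ < n (over ℕ cast to ℤ)
theorem sq_lt_of_cube_lt (n : Int) (t : ℕ) (h : (t : ℤ) ^ 3 < n) : (t : ℤ) ^ 2 < n := by
  have : (t : ℤ) ^ 2 ≤ (t : ℤ) ^ 3 := by
    rcases Nat.eq_zero_or_pos t with h0 | h0
    · subst h0; norm_num
    · have : (1 : ℤ) ≤ (t : ℤ) := by exact_mod_cast h0
      nlinarith
  omega

-- the inner loop at a cube a = t³ yields exactly [[t³, t²]]
theorem innerA_cube (n : Int) (t : ℕ) (h : (t : ℤ) ^ 3 < n) :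
    innerA n ((t : ℤ) ^ 3) = [[(t : ℤ) ^ 3, (t : ℤ) ^ 2]] := by
  have hsq : (t : ℤ) ^ 2 < n := sq_lt_of_cube_lt n t h
  have hmem : ((t : ℤ) ^ 2) ∈ PySem.List.pyRange 0 n 1 := by
    rw [PySem.List.mem_pyRange_one]; constructor
    · positivity
    · exact hsq
  unfold innerA
  rw [flatMap_eq_of_unique _ _ ((t : ℤ) ^ 2) (PySem.List.nodup_pyRange_one 0 n)
    hmem ?uniq]
  · rw [if_pos (by ring)]
  case uniq =>
    intro b hbmem hbne
    rw [PySem.List.mem_pyRange_one] at hbmem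
    rw [if_neg]
    intro heq
    have : b ^ 3 = ((t : ℤ) ^ 2) ^ 3 := by rw [← heq]; ring
    exact hbne (cube_inj_nonneg b _ hbmem.1 (by positivity) this)

-- the inner loop at a non-cube a yields []
theorem innerA_noncube (n a : Int) (ha : 0 ≤ a)
    (h : ¬ ∃ t : ℕ, a = (t : ℤ) ^ 3) : innerA n a = [] := by
  unfold innerA
  apply flatMap_eq_nil_of
  intro b hbmem
  rw [PySem.List.mem_pyRange_one] at hbmem
  rw [if_neg]
  intro heq
  obtain ⟨t, h1, -⟩ := (sq_eq_cube_iff_int a b ha hbmem.1).mp heq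
  exact h ⟨t, h1⟩

-- no integer strictly between t³ and (t+1)³ is a cube
theorem noncube_between (t : ℕ) (a : Int) (h1 : (t : ℤ) ^ 3 < a)
    (h2 : a < ((t : ℤ) + 1) ^ 3) : ¬ ∃ s : ℕ, a = (s : ℤ) ^ 3 := by
  rintro ⟨s, rfl⟩
  have hts : t < s := by
    by_contra hc
    have : (s : ℤ) ≤ (t : ℤ) := by exact_mod_cast Nat.not_lt.mp hc
    have : (s : ℤ) ^ 3 ≤ (t : ℤ) ^ 3 := by gcongr
    omega
  have : (t : ℤ) + 1 ≤ (s : ℤ) := by exact_mod_cast hts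
  have : ((t : ℤ) + 1) ^ 3 ≤ (s : ℤ) ^ 3 := by gcongr
  omega

-- the flatMap of innerA over [t³, c) equals [[t³, t²]] whenever t³ < c ≤ (t+1)³ and t³ < n
theorem flatMap_interval (n : Int) (t : ℕ) (c : Int) (hc1 : (t : ℤ) ^ 3 < c)
    (hc2 : c ≤ ((t : ℤ) + 1) ^ 3) (hn : (t : ℤ) ^ 3 < n) :
    (PySem.List.pyRange ((t : ℤ) ^ 3) c 1).flatMap (innerA n) =
      [[(t : ℤ) ^ 3, (t : ℤ) ^ 2]] := by
  rw [flatMap_eq_of_unique _ _ ((t : ℤ) ^ 3) (PySem.List.nodup_pyRange_one _ c)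
    (by rw [PySem.List.mem_pyRange_one]; exact ⟨le_refl _, hc1⟩) ?uniq]
  · exact innerA_cube n t hn
  case uniq =>
    intro a hamem hane
    rw [PySem.List.mem_pyRange_one] at hamem
    apply innerA_noncube n a (le_trans (by positivity) hamem.1)
    apply noncube_between t a (lt_of_le_of_ne hamem.1 (Ne.symm hane))
    omega

-- main loop correspondence, by induction on the remaining distance n - t³
theorem main_loop (n : Int) : ∀ (k : ℕ) (t : ℕ), ((n - (t : ℤ) ^ 3).toNat ≤ k) →
    (t : ℤ) ^ 3 ≤ n →
    (PySem.List.pyRange ((t : ℤ) ^ 3) n 1).flatMap (innerA n) = altLoop n t := by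
  intro k
  induction k with
  | zero =>
    intro t hk hle
    have : (t : ℤ) ^ 3 = n := by omega
    rw [this, PySem.List.pyRange_one_eq_nil (le_refl n)]
    rw [altLoop, if_neg (by omega)]
    simp
  | succ k ih =>
    intro t hk hle
    by_cases hlt : (t : ℤ) ^ 3 < n
    · have hsucc : (t : ℤ) ^ 3 < ((t : ℤ) + 1) ^ 3 := by
        have : (0 : ℤ) ≤ (t : ℤ) := by positivity
        nlinarith
      rw [altLoop, if_pos ⟨hlt, sq_lt_of_cube_lt n t hlt⟩]
      by_cases hnext : ((t : ℤ) + 1) ^ 3 ≤ n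
      · rw [PySem.List.pyRange_one_append _ (((t : ℤ) + 1) ^ 3) _ (le_of_lt hsucc) hnext,
          List.flatMap_append,
          flatMap_interval n t _ hsucc (le_refl _) hlt]
        have hcast : ((t : ℤ) + 1) ^ 3 = (((t + 1 : ℕ) : ℤ)) ^ 3 := by push_cast; ring
        have hrec := ih (t + 1) (by push_cast at hk ⊢; omega) (by rw [← hcast]; exact hnext)
        rw [hcast, hrec]
        rfl
      · rw [not_le] at hnext
        rw [flatMap_interval n t n hlt (le_of_lt hnext) hlt]
        have : altLoop n (t + 1) = [] := by
          rw [altLoop, if_neg]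
          push_cast
          intro hcontra
          omega
        rw [this]
    · have : (t : ℤ) ^ 3 = n := by omega
      rw [this, PySem.List.pyRange_one_eq_nil (le_refl n)]
      rw [altLoop, if_neg (by omega)]
      simp

-- foldl congruence on the function (pointwise on members of the list)
theorem foldl_ext_local {α β : Type} {l : List α} {f g : β → α → β} {init : β}
    (h : ∀ acc, ∀ a ∈ l, f acc a = g acc a) : l.foldl f init = l.foldl g init := by
  induction l generalizing init with
  | nil => rfl
  | cons x xs ih =>
    simp only [List.foldl_cons]
    rw [h init x List.mem_cons_self]
    exact ih (fun acc a ha => h acc a (List.mem_cons_of_mem _ ha))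

-- A's result list in flatMap form
theorem answer_res_eq (n : Int) :
    ((PySem.List.pyRange 0 n 1).foldl (fun res a =>
      (PySem.List.pyRange 0 n 1).foldl (fun res b =>
        if a ^ 2 = b ^ 3 then res ++ [[a, b]] else res) res) []) =
    (PySem.List.pyRange 0 n 1).flatMap (innerA n) := by
  have step1 : ∀ (acc : List (List Int)) (a : Int),
      (PySem.List.pyRange 0 n 1).foldl (fun res b =>
        if a ^ 2 = b ^ 3 then res ++ [[a, b]] else res) acc = acc ++ innerA n a := by
    intro acc a
    rw [PySem.List.foldl_append_ite (p := fun b => a ^ 2 = b ^ 3) (f := fun b => [a, b])]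
    unfold innerA
    rw [filter_map_eq_flatMap]
    simp only [decide_eq_true_eq]
  calc ((PySem.List.pyRange 0 n 1).foldl (fun res a =>
      (PySem.List.pyRange 0 n 1).foldl (fun res b =>
        if a ^ 2 = b ^ 3 then res ++ [[a, b]] else res) res) [])
      = (PySem.List.pyRange 0 n 1).foldl (fun res a => res ++ innerA n a) [] := by
        apply foldl_ext_local
        intro acc a _
        exact step1 acc a
    _ = [] ++ (PySem.List.pyRange 0 n 1).flatMap (innerA n) :=
        PySem.List.foldl_append_eq_flatMap _ _ _
    _ = _ := by simp

-- ===== VERDICT (by name: the statement is the Claim_ definition above) =====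
theorem answer_spec : Claim_equal_answer := by
  intro n _
  unfold Spec_answer answer answer_alt
  rw [answer_res_eq n]
  by_cases hn : 0 < n
  · have h0 : ((0 : ℕ) : ℤ) ^ 3 = 0 := by norm_num
    have := main_loop n (n.toNat) 0 (by simp) (by norm_num; omega)
    simp only [Nat.cast_zero] at this
    norm_num at this
    rw [this]
  · have hempty : PySem.List.pyRange 0 n 1 = [] :=
      PySem.List.pyRange_one_eq_nil (by omega)
    have halt : altLoop n 0 = [] := by
      rw [altLoop, if_neg (by push_cast; omega)]
    rw [hempty, halt]
    rfl
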